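-- pv_equiv track=rewrite | github.com/youjinjoy/baekjoonHub | 프로그래머스/2/84512. 모음 사전/모음 사전.py | backtrack
-- ===== SOURCE A (Python) =====
-- def backtrack(result, D, cnt):
--     word = ''.join(result)
--     D[word] = cnt
--
--     cnt += 1
--
--     if len(result) == 5:
--         return cnt
--
--     for letter in ['A', 'E', 'I', 'O', 'U']:
--         result.append(letter)
--         cnt = backtrack(result, D, cnt)
--         result.pop()
--
--     return cnt
-- ===== SOURCE B (Python) =====
-- def backtrack(result, D, cnt):
--     prefix = ''.join(result)
--     words = []
--     level = ['']
--     for _ in range(6 - len(result)):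
--         words.extend(prefix + s for s in level)
--         level = [s + c for s in level for c in 'AEIOU']
--     words.sort()
--     for i, w in enumerate(words, cnt):
--         D[w] = i
--     return cnt + len(words)
-- ===== Notes on version B (the rewrite author's own statement) =====
-- stated objective: alternative
-- what changed: Replaces the recursive DFS with an iterative level-by-level generation of all vowel suffixes, a sort, and a single enumeration that fills D and returns cnt plus the word count; result is read but never mutated.
import Mathlib
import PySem

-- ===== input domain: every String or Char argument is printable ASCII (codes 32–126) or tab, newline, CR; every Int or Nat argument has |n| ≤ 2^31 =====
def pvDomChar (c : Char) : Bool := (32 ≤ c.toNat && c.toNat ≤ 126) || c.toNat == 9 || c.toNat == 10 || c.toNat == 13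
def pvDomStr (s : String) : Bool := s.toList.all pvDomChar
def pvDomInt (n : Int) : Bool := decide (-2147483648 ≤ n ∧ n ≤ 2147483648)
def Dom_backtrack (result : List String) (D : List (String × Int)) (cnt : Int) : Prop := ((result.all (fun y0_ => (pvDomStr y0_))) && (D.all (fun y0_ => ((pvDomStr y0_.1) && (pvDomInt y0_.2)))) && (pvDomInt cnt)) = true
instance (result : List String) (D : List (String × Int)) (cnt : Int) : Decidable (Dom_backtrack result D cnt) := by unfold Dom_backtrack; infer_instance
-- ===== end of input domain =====

-- B replaces A's recursive DFS by iterative generate/sort/enumerate (alternative decomposition, not faster);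
-- both A and B mutate D identically (A also temporarily mutates result); the equivalence proved is about the RETURN value only.

-- ===== PORT A =====
-- A recurses without bound when result has length > 5 (Python RecursionError); the fuel 6 suffices
-- for every input admitted by Pre_backtrack, and fuel exhaustion happens only outside Pre_.
def backtrackGoA : Nat → List String → Int → Int
  | 0, _, cnt => cnt
  | fuel + 1, result, cnt =>
    let cnt := cnt + 1
    if result.length == 5 then cnt
    else
      ["A", "E", "I", "O", "U"].foldl (fun c letter => backtrackGoA fuel (result ++ [letter]) c) cnt

def backtrack (result : List String) (D : List (String × Int)) (cnt : Int) : Int :=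
  backtrackGoA 6 result cnt

-- ===== PORT B =====
-- the loop of Source B: (iterations left, prefix, words, level) → words; strings handled as List Char
def backtrackLoopB : Nat → List Char → List (List Char) → List (List Char) → List (List Char)
  | 0, _, words, _ => words
  | n + 1, pre, words, level =>
    backtrackLoopB n pre (words ++ level.map (fun s => pre ++ s))
      (level.flatMap (fun s => (['A', 'E', 'I', 'O', 'U'].map (fun c => s ++ [c]))))

def backtrack_alt (result : List String) (D : List (String × Int)) (cnt : Int) : Int :=
  let pre : List Char := result.flatMap String.toList       -- ''.join(result)
  let words := backtrackLoopB (6 - result.length) pre [] [[]]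
  let sortedWords := PySem.List.sorted words (fun w => w) false
  cnt + (sortedWords.length : Int)

-- ===== PRECONDITION & SPEC =====
-- Pre_ excludes exactly the inputs with len(result) > 5, on which A never returns (RecursionError).
def Pre_backtrack (result : List String) (D : List (String × Int)) (cnt : Int) : Prop :=
  result.length ≤ 5
instance (result : List String) (D : List (String × Int)) (cnt : Int) : Decidable (Pre_backtrack result D cnt) := by unfold Pre_backtrack; infer_instance
def pvWitness_backtrack : List String × (List (String × Int)) × Int := (["A", "E"], [], 7)

def Spec_backtrack (result : List String) (D : List (String × Int)) (cnt : Int) (out : Int) : Prop := out = backtrack_alt result D cnt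
instance (result : List String) (D : List (String × Int)) (cnt : Int) (out : Int) : Decidable (Spec_backtrack result D cnt out) := by unfold Spec_backtrack; infer_instance

-- ===== CLAIM (what is proved, stated in full; the proofs are below) =====
def Claim_equal_backtrack : Prop := ∀ (result : List String) (D : List (String × Int)) (cnt : Int), Dom_backtrack result D cnt → Pre_backtrack result D cnt → Spec_backtrack result D cnt (backtrack result D cnt)

-- ===== LEMMAS AND PROOFS =====

-- number of words with a given remaining budget: wordCount n = 1 + 5 + … + 5^(n-1)
def wordCount : Nat → Int
  | 0 => 0
  | n + 1 => 1 + 5 * wordCount n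

theorem backtrackGoA_eq (fuel : Nat) :
    ∀ (result : List String) (cnt : Int), result.length ≤ 5 → 6 - result.length ≤ fuel →
      backtrackGoA fuel result cnt = cnt + wordCount (6 - result.length) := by
  induction fuel with
  | zero => intro result cnt h5 hf; omega
  | succ f ih =>
    intro result cnt h5 hf
    by_cases h : result.length = 5
    · simp [backtrackGoA, h, wordCount]
    · have hlt : result.length < 5 := lt_of_le_of_ne h5 h
      have key : ∀ (x : String) (c : Int),
          backtrackGoA f (result ++ [x]) c = c + wordCount (6 - (result.length + 1)) := by
        intro x c
        have := ih (result ++ [x]) c (by simp; omega) (by simp; omega)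
        simpa using this
      have hne : (result.length == 5) = false := by simp [h]
      simp only [backtrackGoA, List.foldl, hne, key]
      have h6 : 6 - result.length = (6 - (result.length + 1)) + 1 := by omega
      rw [h6, wordCount]
      simp
      ring

theorem backtrackLoopB_length (n : Nat) :
    ∀ (pre : List Char) (words level : List (List Char)),
      ((backtrackLoopB n pre words level).length : Int)
        = words.length + level.length * wordCount n := by
  induction n with
  | zero => intro pre words level; simp [backtrackLoopB, wordCount]
  | succ m ih =>
    intro pre words level
    rw [backtrackLoopB, ih]
    simp [wordCount]
    ring

theorem backtrack_alt_eq (result : List String) (D : List (String × Int)) (cnt : Int) :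
    backtrack_alt result D cnt = cnt + wordCount (6 - result.length) := by
  show cnt + ((PySem.List.sorted (backtrackLoopB (6 - result.length)
      (result.flatMap String.toList) [] [[]]) (fun w => w) false).length : Int)
    = cnt + wordCount (6 - result.length)
  rw [PySem.List.length_sorted, backtrackLoopB_length]
  simp

-- ===== VERDICT (by name: the statement is the Claim_ definition above) =====
theorem backtrack_spec : Claim_equal_backtrack := by
  intro result D cnt _ hpre
  unfold Spec_backtrack
  rw [backtrack_alt_eq]
  exact backtrackGoA_eq 6 result cnt hpre (by omega)
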